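-- pv_equiv track=rewrite | github.com/smolk19841984-design/lara | iPad8,9_Analysis/scripts/focus_funcs_diff.py | pair_offsets
-- ===== SOURCE A (Python) =====
-- def pair_offsets(a_offsets, b_offsets):
--     a_sorted = sorted(a_offsets)
--     b_sorted = sorted(b_offsets)
--     pairs = []
--     used = set()
--     for a in a_sorted:
--         best = None; bestd = None
--         for b in b_sorted:
--             if b in used: continue
--             d = abs(a - b)
--             if best is None or d < bestd:
--                 best = b; bestd = d
--         if best is not None:
--             pairs.append((a, best))
--             used.add(best)
--     # remaining b unmatched
--     for b in b_sorted:
--         if b not in used: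
--             pairs.append((None, b))
--     return pairs
-- ===== SOURCE B (Python) =====
-- def pair_offsets(a_offsets, b_offsets):
--     # Greedy nearest-available matching, but each query is a binary search on the
--     # shrinking sorted list of distinct available b values instead of a full scan.
--     b_sorted = sorted(b_offsets)
--     avail = []                      # distinct b values, ascending
--     for b in b_sorted:
--         if not avail or avail[-1] != b:
--             avail.append(b)
--     taken = set()
--     pairs = []
--     for a in sorted(a_offsets):
--         if not avail:
--             continue
--         lo, hi = 0, len(avail)      # bisect_left by hand (no imports in this module)
--         while lo < hi:
--             mid = (lo + hi) // 2
--             if avail[mid] < a: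
--                 lo = mid + 1
--             else:
--                 hi = mid
--         if lo == len(avail):
--             j = lo - 1
--         elif lo == 0:
--             j = 0
--         elif a - avail[lo - 1] <= avail[lo] - a:
--             j = lo - 1              # tie goes to the smaller value
--         else:
--             j = lo
--         v = avail.pop(j)
--         taken.add(v)
--         pairs.append((a, v))
--     for b in b_sorted:
--         if b not in taken:
--             pairs.append((None, b))
--     return pairs
-- ===== Notes on version B (the rewrite author's own statement) =====
-- stated objective: faster
-- what changed: A rescans the whole b_sorted list (skipping a 'used' set) to find the nearest available b for every a; B builds the sorted list of distinct available b values once and answers each query with a binary search for the predecessor/successor, deleting the chosen value.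
import Mathlib
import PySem

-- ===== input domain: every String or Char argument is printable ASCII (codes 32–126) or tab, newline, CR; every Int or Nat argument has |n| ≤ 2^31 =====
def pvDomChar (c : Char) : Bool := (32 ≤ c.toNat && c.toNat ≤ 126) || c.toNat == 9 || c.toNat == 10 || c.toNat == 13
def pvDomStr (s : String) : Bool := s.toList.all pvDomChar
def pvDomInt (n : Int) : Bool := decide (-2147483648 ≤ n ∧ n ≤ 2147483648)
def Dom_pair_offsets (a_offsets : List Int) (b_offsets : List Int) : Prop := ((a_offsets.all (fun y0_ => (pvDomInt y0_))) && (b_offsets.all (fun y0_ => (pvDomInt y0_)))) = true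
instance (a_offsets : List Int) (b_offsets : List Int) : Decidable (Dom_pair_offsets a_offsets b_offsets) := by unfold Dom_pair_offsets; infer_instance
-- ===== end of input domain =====

-- B replaces A's full rescan of b_sorted per a (greedy nearest-neighbour matching) by a
-- hand-written binary search on the shrinking sorted list of distinct available b values.

-- ===== PORT A =====
-- inner loop of A: scan b_sorted, skip used, keep (best, bestd); Python keeps two
-- variables that are None together, modelled as one Option of the pair
def pvBestScan (a : Int) (bs : List Int) (used : PySem.Set Int) : Option (Int × Int) :=
  bs.foldl (fun st b =>
    if PySem.Set.contains used b then st
    else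
      let d := |a - b|
      match st with
      | none => some (b, d)
      | some (_, bestd) => if d < bestd then some (b, d) else st) none

def pair_offsets (a_offsets : List Int) (b_offsets : List Int) : List (Option Int × Int) :=
  let a_sorted := PySem.List.sorted a_offsets (fun x => x) false
  let b_sorted := PySem.List.sorted b_offsets (fun x => x) false
  let st := a_sorted.foldl (fun (st : List (Option Int × Int) × PySem.Set Int) a =>
    match pvBestScan a b_sorted st.2 with
    | some (best, _) => (st.1 ++ [((some a : Option Int), best)], PySem.Set.add st.2 best)
    | none => st) ([], PySem.Set.empty)
  st.1 ++ (b_sorted.filter (fun b => !(PySem.Set.contains st.2 b))).map (fun b => ((none : Option Int), b))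

-- ===== PORT B =====
-- hand-written bisect_left of Source B (Source B may not import bisect: module a imports nothing)
def pvBisect (avail : List Int) (a : Int) (lo hi : Nat) : Nat :=
  if h : lo < hi then
    let mid := (lo + hi) / 2
    if PySem.List.pyGetD avail (mid : Int) 0 < a then pvBisect avail a (mid + 1) hi
    else pvBisect avail a lo mid
  else lo
termination_by hi - lo
decreasing_by all_goals omega

-- Source B's build of avail: b_sorted with adjacent duplicates dropped
def pvBuildAvail (b_sorted : List Int) : List Int :=
  b_sorted.foldl (fun av b =>
    if av.isEmpty || !(PySem.List.pyGetD av (-1) 0 == b) then av ++ [b] else av) []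

-- one iteration of Source B's loop over sorted(a_offsets); state = (avail, taken, pairs)
def pvStepB (a : Int) (st : List Int × PySem.Set Int × List (Option Int × Int)) :
    List Int × PySem.Set Int × List (Option Int × Int) :=
  let (avail, taken, pairs) := st
  if avail.isEmpty then st
  else
    let lo := pvBisect avail a 0 avail.length
    let j : Nat :=
      if lo = avail.length then lo - 1
      else if lo = 0 then 0
      else if a - PySem.List.pyGetD avail ((lo : Int) - 1) 0 ≤ PySem.List.pyGetD avail (lo : Int) 0 - a then lo - 1
      else lo
    match PySem.List.pop? avail (j : Int) with
    | some (v, rest) => (rest, PySem.Set.add taken v, pairs ++ [((some a : Option Int), v)])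
    | none => st   -- unreachable (j is always in range); totalization only

def pair_offsets_alt (a_offsets : List Int) (b_offsets : List Int) : List (Option Int × Int) :=
  let b_sorted := PySem.List.sorted b_offsets (fun x => x) false
  let st := (PySem.List.sorted a_offsets (fun x => x) false).foldl
    (fun st a => pvStepB a st) (pvBuildAvail b_sorted, PySem.Set.empty, [])
  st.2.2 ++ (b_sorted.filter (fun b => !(PySem.Set.contains st.2.1 b))).map (fun b => ((none : Option Int), b))

-- ===== PRECONDITION & SPEC =====
def Spec_pair_offsets (a_offsets : List Int) (b_offsets : List Int) (out : List (Option Int × Int)) : Prop := out = pair_offsets_alt a_offsets b_offsets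
instance (a_offsets : List Int) (b_offsets : List Int) (out : List (Option Int × Int)) : Decidable (Spec_pair_offsets a_offsets b_offsets out) := by unfold Spec_pair_offsets; infer_instance

-- ===== CLAIM (what is proved, stated in full; the proofs are below) =====
def Claim_equal_pair_offsets : Prop := ∀ (a_offsets : List Int) (b_offsets : List Int), Dom_pair_offsets a_offsets b_offsets → Spec_pair_offsets a_offsets b_offsets (pair_offsets a_offsets b_offsets)

-- ===== LEMMAS AND PROOFS =====

-- the value both programs pick: the member of S nearest to a, ties to the smaller value
def PvIsBest (a v : Int) (S : List Int) : Prop :=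
  v ∈ S ∧ ∀ w ∈ S, |a - v| < |a - w| ∨ (|a - v| = |a - w| ∧ v ≤ w)

lemma pvIsBest_unique {a v w : Int} {S : List Int}
    (h1 : PvIsBest a v S) (h2 : PvIsBest a w S) : v = w := by
  rcases h1 with ⟨hv, h1⟩; rcases h2 with ⟨hw, h2⟩
  rcases h1 w hw with h | ⟨e1, l1⟩ <;> rcases h2 v hv with h' | ⟨e2, l2⟩ <;> omega

lemma pvIsBest_congr {a v : Int} {S T : List Int}
    (hm : ∀ w, w ∈ S ↔ w ∈ T) (h : PvIsBest a v S) : PvIsBest a v T :=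
  ⟨(hm v).1 h.1, fun w hw => h.2 w ((hm w).2 hw)⟩

-- ---- A side ----

-- the used-guarded scan is the plain scan of the filtered list
lemma pvBestScan_eq_filter (a : Int) (bs : List Int) (used : PySem.Set Int) :
    pvBestScan a bs used =
      (bs.filter (fun b => !(PySem.Set.contains used b))).foldl (fun st b =>
        let d := |a - b|
        match st with
        | none => some (b, d)
        | some (_, bestd) => if d < bestd then some (b, d) else st) none := by
  unfold pvBestScan
  generalize (none : Option (Int × Int)) = st
  induction bs generalizing st with
  | nil => rfl
  | cons b bs ih =>
    rw [List.foldl_cons, List.filter_cons]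
    by_cases h : PySem.Set.contains used b = true
    · rw [if_pos h]
      simp only [h, Bool.not_true, Bool.false_eq_true, if_false]
      exact ih st
    · rw [if_neg h]
      simp only [Bool.not_eq_true] at h
      simp only [h, Bool.not_false, if_true, List.foldl_cons]
      exact ih _

-- the plain scan of a ≤-sorted list picks the nearest value, ties to the smaller one
lemma pvScan_spec (a : Int) : ∀ (F : List Int) (cur : Int), (cur :: F).Pairwise (· ≤ ·) →
    ∃ v, (F.foldl (fun st b =>
        let d := |a - b|
        match st with
        | none => some (b, d)
        | some (_, bestd) => if d < bestd then some (b, d) else st)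
        (some (cur, |a - cur|))) = some (v, |a - v|) ∧ PvIsBest a v (cur :: F) := by
  intro F
  induction F with
  | nil =>
    intro cur _
    exact ⟨cur, rfl, List.mem_cons_self, fun w hw => by
      simp at hw; subst hw; exact Or.inr ⟨rfl, le_refl _⟩⟩
  | cons x F ih =>
    intro cur hs
    rw [List.foldl_cons]
    simp only []
    by_cases h : |a - x| < |a - cur|
    · rw [if_pos h]
      obtain ⟨v, he, hv, hb⟩ := ih x hs.tail
      refine ⟨v, he, List.mem_cons_of_mem _ hv, fun w hw => ?_⟩
      rcases List.mem_cons.1 hw with rfl | hw'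
      · rcases hb x List.mem_cons_self with h' | ⟨e, _⟩
        · exact Or.inl (lt_trans h' h)
        · exact Or.inl (e ▸ h)
      · exact hb w hw'
    · rw [if_neg h]
      rw [not_lt] at h
      have hcx : cur ≤ x := (List.pairwise_cons.1 hs).1 x List.mem_cons_self
      have hs' : (cur :: F).Pairwise (· ≤ ·) := by
        rw [List.pairwise_cons] at hs ⊢
        exact ⟨fun y hy => hs.1 y (List.mem_cons_of_mem _ hy), hs.2.tail⟩
      obtain ⟨v, he, hv, hb⟩ := ih cur hs'
      refine ⟨v, he, ?_, fun w hw => ?_⟩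
      · rcases List.mem_cons.1 hv with rfl | hv'
        · exact List.mem_cons_self
        · exact List.mem_cons_of_mem _ (List.mem_cons_of_mem _ hv')
      · rcases List.mem_cons.1 hw with rfl | hw'
        · exact hb w List.mem_cons_self
        · rcases List.mem_cons.1 hw' with rfl | hw''
          · rcases hb cur List.mem_cons_self with h' | ⟨e, l⟩
            · exact Or.inl (lt_of_lt_of_le h' h)
            · rcases lt_or_eq_of_le (le_trans (le_of_eq e) h) with h2 | h2
              · exact Or.inl h2
              · exact Or.inr ⟨h2, le_trans l hcx⟩
          · exact hb w (List.mem_cons_of_mem _ hw'')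

-- ---- B side ----

lemma pvGetD_mono (avail : List Int) (hs : avail.Pairwise (· < ·)) :
    ∀ p q, p ≤ q → q < avail.length → avail.getD p 0 ≤ avail.getD q 0 := by
  intro p q hpq hq
  rw [List.getD_eq_getElem _ _ (lt_of_le_of_lt hpq hq), List.getD_eq_getElem _ _ hq]
  rcases lt_or_eq_of_le hpq with h | h
  · exact le_of_lt ((List.pairwise_iff_getElem.1 hs) p q _ hq h)
  · subst h; rfl

lemma pvGetD_smono (avail : List Int) (hs : avail.Pairwise (· < ·))
    {p q : Nat} (hpq : p < q) (hq : q < avail.length) : avail.getD p 0 < avail.getD q 0 := by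
  rw [List.getD_eq_getElem _ _ (lt_trans hpq hq), List.getD_eq_getElem _ _ hq]
  exact (List.pairwise_iff_getElem.1 hs) p q _ hq hpq

lemma pvGetD_mem (avail : List Int) {k : Nat} (hk : k < avail.length) : avail.getD k 0 ∈ avail := by
  rw [List.getD_eq_getElem _ _ hk]; exact List.getElem_mem _

lemma pvBisect_spec (avail : List Int) (a : Int) (hs : avail.Pairwise (· < ·)) (lo hi : Nat)
    (hhi : hi ≤ avail.length) (hlh : lo ≤ hi) :
    lo ≤ pvBisect avail a lo hi ∧ pvBisect avail a lo hi ≤ hi ∧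
    (∀ k, lo ≤ k → k < pvBisect avail a lo hi → avail.getD k 0 < a) ∧
    (∀ k, pvBisect avail a lo hi ≤ k → k < hi → a ≤ avail.getD k 0) := by
  fun_induction pvBisect avail a lo hi with
  | case1 lo hi h mid hlt ih =>
    have hmid : mid < hi := by simp only [mid]; omega
    have hmlo : lo ≤ mid := by simp only [mid]; omega
    rw [PySem.List.pyGetD_natCast] at hlt
    obtain ⟨i1, i2, i3, i4⟩ := ih hhi (by omega)
    refine ⟨by omega, i2, fun k hk1 hk2 => ?_, i4⟩
    by_cases hk : mid + 1 ≤ k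
    · exact i3 k hk hk2
    · exact lt_of_le_of_lt (pvGetD_mono avail hs k mid (by omega) (by omega)) hlt
  | case2 lo hi h mid hge ih =>
    have hmid : mid < hi := by simp only [mid]; omega
    have hmlo : lo ≤ mid := by simp only [mid]; omega
    rw [PySem.List.pyGetD_natCast, not_lt] at hge
    obtain ⟨i1, i2, i3, i4⟩ := ih (by omega) (by omega)
    refine ⟨i1, by omega, i3, fun k hk1 hk2 => ?_⟩
    by_cases hk : k < mid
    · exact i4 k hk1 hk
    · exact le_trans hge (pvGetD_mono avail hs mid k (by omega) (by omega))
  | case3 lo hi h =>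
    exact ⟨le_refl _, by omega, fun k hk1 hk2 => by omega, fun k hk1 hk2 => by omega⟩

-- Source B's index choice picks the best value of a strictly sorted nonempty avail
lemma pvChoose_spec (avail : List Int) (a : Int) (hs : avail.Pairwise (· < ·))
    (hne : avail ≠ []) (j : Nat)
    (hj : j = (let lo := pvBisect avail a 0 avail.length
      if lo = avail.length then lo - 1
      else if lo = 0 then 0
      else if a - PySem.List.pyGetD avail ((lo : Int) - 1) 0 ≤ PySem.List.pyGetD avail (lo : Int) 0 - a then lo - 1
      else lo)) :
    j < avail.length ∧ PvIsBest a (avail.getD j 0) avail := by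
  have hlen : 0 < avail.length := List.length_pos_of_ne_nil hne
  set lo := pvBisect avail a 0 avail.length with hlodef
  obtain ⟨b1, b2, b3, b4⟩ := pvBisect_spec avail a hs 0 avail.length (le_refl _) (by omega)
  have hlo : ∀ k, k < lo → avail.getD k 0 < a := fun k h => b3 k (by omega) h
  have hhi : ∀ k, lo ≤ k → k < avail.length → a ≤ avail.getD k 0 := b4
  have hmem : ∀ w ∈ avail, ∃ k, k < avail.length ∧ avail.getD k 0 = w := by
    intro w hw
    obtain ⟨k, hk, he⟩ := List.mem_iff_getElem.1 hw
    exact ⟨k, hk, by rw [List.getD_eq_getElem _ _ hk]; exact he⟩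
  by_cases h1 : lo = avail.length
  · have hjv : j = avail.length - 1 := by rw [hj]; simp [h1]
    have hjlt : j < avail.length := by omega
    refine ⟨hjlt, pvGetD_mem avail hjlt, ?_⟩
    intro w hw
    obtain ⟨k, hk, rfl⟩ := hmem w hw
    have hkv : avail.getD k 0 < a := hlo k (by omega)
    have hjv2 : avail.getD j 0 < a := hlo j (by omega)
    by_cases hkj : k = j
    · subst hkj; exact Or.inr ⟨rfl, le_refl _⟩
    · have hlt : avail.getD k 0 < avail.getD j 0 := pvGetD_smono avail hs (by omega) hjlt
      left
      rw [abs_of_nonneg (by omega : (0:Int) ≤ a - avail.getD j 0),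
          abs_of_nonneg (by omega : (0:Int) ≤ a - avail.getD k 0)]
      omega
  · by_cases h2 : lo = 0
    · have hjv : j = 0 := by rw [hj]; simp only [if_neg h1, if_pos h2]
      have hjlt : j < avail.length := by omega
      refine ⟨hjlt, pvGetD_mem avail hjlt, ?_⟩
      intro w hw
      obtain ⟨k, hk, rfl⟩ := hmem w hw
      have hkv : a ≤ avail.getD k 0 := hhi k (by omega) hk
      have hjv2 : a ≤ avail.getD j 0 := hhi j (by omega) (by omega)
      by_cases hkj : k = j
      · subst hkj; exact Or.inr ⟨rfl, le_refl _⟩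
      · have hlt : avail.getD j 0 < avail.getD k 0 := pvGetD_smono avail hs (by omega) hk
        left
        rw [abs_of_nonpos (by omega : a - avail.getD j 0 ≤ 0),
            abs_of_nonpos (by omega : a - avail.getD k 0 ≤ 0)]
        omega
    · have hlo1 : lo - 1 < avail.length := by omega
      have hlolen : lo < avail.length := by omega
      have hp : avail.getD (lo-1) 0 < a := hlo (lo-1) (by omega)
      have hsv : a ≤ avail.getD lo 0 := hhi lo (by omega) hlolen
      have hcast1 : PySem.List.pyGetD avail ((lo : Int) - 1) 0 = avail.getD (lo-1) 0 := by
        have he : ((lo : Int) - 1) = ((lo - 1 : Nat) : Int) := by omega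
        rw [he, PySem.List.pyGetD_natCast]
      have hcast2 : PySem.List.pyGetD avail ((lo : Int)) 0 = avail.getD lo 0 := by
        rw [PySem.List.pyGetD_natCast]
      by_cases h3 : a - PySem.List.pyGetD avail ((lo : Int) - 1) 0 ≤ PySem.List.pyGetD avail (lo : Int) 0 - a
      · have hjv : j = lo - 1 := by rw [hj]; simp only [if_neg h1, if_neg h2, if_pos h3]
        rw [hcast1, hcast2] at h3
        have hjlt : j < avail.length := by omega
        refine ⟨hjlt, pvGetD_mem avail hjlt, ?_⟩
        intro w hw
        obtain ⟨k, hk, rfl⟩ := hmem w hw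
        have hd : |a - avail.getD j 0| = a - avail.getD (lo-1) 0 := by
          rw [hjv]; exact abs_of_nonneg (by omega)
        by_cases hkj : k = lo - 1
        · subst hkj; rw [hjv]; exact Or.inr ⟨rfl, le_refl _⟩
        · by_cases hklt : k < lo
          · have hlt : avail.getD k 0 < avail.getD (lo-1) 0 := pvGetD_smono avail hs (by omega) hlo1
            have hka : avail.getD k 0 < a := hlo k hklt
            left; rw [hd, abs_of_nonneg (by omega : (0:Int) ≤ a - avail.getD k 0)]; omega
          · have hka : a ≤ avail.getD k 0 := hhi k (by omega) hk
            have hks : avail.getD lo 0 ≤ avail.getD k 0 := pvGetD_mono avail hs lo k (by omega) hk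
            have hdk : |a - avail.getD k 0| = avail.getD k 0 - a := by
              rw [abs_of_nonpos (by omega)]; omega
            rw [hd, hdk]
            have hle : a - avail.getD (lo-1) 0 ≤ avail.getD k 0 - a := by omega
            rcases lt_or_eq_of_le hle with hx | hx
            · exact Or.inl hx
            · right; refine ⟨hx, ?_⟩; rw [hjv]; omega
      · have hjv : j = lo := by rw [hj]; simp only [if_neg h1, if_neg h2, if_neg h3]
        rw [hcast1, hcast2, not_le] at h3
        have hjlt : j < avail.length := by omega
        refine ⟨hjlt, pvGetD_mem avail hjlt, ?_⟩
        intro w hw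
        obtain ⟨k, hk, rfl⟩ := hmem w hw
        have hd : |a - avail.getD j 0| = avail.getD lo 0 - a := by
          rw [hjv, abs_of_nonpos (by omega)]; omega
        by_cases hkj : k = lo
        · subst hkj; rw [hjv]; exact Or.inr ⟨rfl, le_refl _⟩
        · by_cases hklt : k < lo
          · have hle : avail.getD k 0 ≤ avail.getD (lo-1) 0 := pvGetD_mono avail hs k (lo-1) (by omega) hlo1
            have hka : avail.getD k 0 < a := hlo k hklt
            left; rw [hd, abs_of_nonneg (by omega : (0:Int) ≤ a - avail.getD k 0)]; omega
          · have hlt : avail.getD lo 0 < avail.getD k 0 := pvGetD_smono avail hs (by omega) hk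
            have hka : a ≤ avail.getD k 0 := hhi k (by omega) hk
            left; rw [hd, abs_of_nonpos (by omega : a - avail.getD k 0 ≤ 0)]; omega

lemma pvLe_getLast (l : List Int) (h : l.Pairwise (· < ·)) {x : Int} (hx : x ∈ l) (hne : l ≠ []) :
    x ≤ l.getLast hne := by
  obtain ⟨k, hk, rfl⟩ := List.mem_iff_getElem.1 hx
  rw [List.getLast_eq_getElem]
  rcases Nat.lt_or_ge k (l.length - 1) with h' | h'
  · exact le_of_lt ((List.pairwise_iff_getElem.1 h) k (l.length - 1) hk (by omega) h')
  · have : k = l.length - 1 := by omega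
    subst this; rfl

lemma pvBuild_go : ∀ (ys av : List Int), av.Pairwise (· < ·) →
    (∀ x ∈ av, ∀ y ∈ ys, x ≤ y) → ys.Pairwise (· ≤ ·) →
    (ys.foldl (fun av b =>
      if av.isEmpty || !(PySem.List.pyGetD av (-1) 0 == b) then av ++ [b] else av) av).Pairwise (· < ·) ∧
    (∀ w, w ∈ ys.foldl (fun av b =>
      if av.isEmpty || !(PySem.List.pyGetD av (-1) 0 == b) then av ++ [b] else av) av ↔ w ∈ av ∨ w ∈ ys) := by
  intro ys
  induction ys with
  | nil =>
    intro av h1 _ _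
    exact ⟨h1, fun w => by simp⟩
  | cons b ys ih =>
    intro av h1 h2 h3
    rw [List.foldl_cons]
    by_cases hg : (av.isEmpty || !(PySem.List.pyGetD av (-1) 0 == b)) = true
    · rw [if_pos hg]
      have hxb : ∀ x ∈ av, x < b := by
        intro x hx
        have hne : av ≠ [] := List.ne_nil_of_mem hx
        have hxle : x ≤ b := h2 x hx b List.mem_cons_self
        rcases lt_or_eq_of_le hxle with h' | h'
        · exact h'
        · exfalso
          subst h'
          rcases Bool.or_eq_true_iff.1 hg with he | he
          · exact hne (List.isEmpty_iff.1 he)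
          · rw [PySem.List.pyGetD_neg_one av 0 hne] at he
            have h1e : av.getLast hne ≤ x := h2 _ (List.getLast_mem hne) x List.mem_cons_self
            have h2e : x ≤ av.getLast hne := pvLe_getLast av h1 hx hne
            simp at he
            omega
      have h1' : (av ++ [b]).Pairwise (· < ·) := by
        rw [List.pairwise_append]
        exact ⟨h1, List.pairwise_singleton _ _, fun x hx y hy => by
          rw [List.mem_singleton] at hy; subst hy; exact hxb x hx⟩
      have h2' : ∀ x ∈ av ++ [b], ∀ y ∈ ys, x ≤ y := by
        intro x hx y hy
        rcases List.mem_append.1 hx with hx' | hx'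
        · exact h2 x hx' y (List.mem_cons_of_mem _ hy)
        · rw [List.mem_singleton] at hx'; subst hx'
          exact (List.pairwise_cons.1 h3).1 y hy
      obtain ⟨c1, c2⟩ := ih (av ++ [b]) h1' h2' h3.tail
      refine ⟨c1, fun w => ?_⟩
      rw [c2 w]
      simp [List.mem_append, or_assoc]
    · rw [if_neg hg]
      simp only [Bool.or_eq_true, not_or, Bool.not_eq_true, List.isEmpty_eq_false_iff] at hg
      obtain ⟨hne, hlast⟩ := hg
      have hbav : b ∈ av := by
        rw [PySem.List.pyGetD_neg_one av 0 hne] at hlast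
        simp at hlast
        rw [← hlast]; exact List.getLast_mem hne
      have h2' : ∀ x ∈ av, ∀ y ∈ ys, x ≤ y := fun x hx y hy => h2 x hx y (List.mem_cons_of_mem _ hy)
      obtain ⟨c1, c2⟩ := ih av h1 h2' h3.tail
      refine ⟨c1, fun w => ?_⟩
      rw [c2 w]
      simp only [List.mem_cons]
      constructor
      · rintro (h | h)
        · exact Or.inl h
        · exact Or.inr (Or.inr h)
      · rintro (h | h | h)
        · exact Or.inl h
        · subst h; exact Or.inl hbav
        · exact Or.inr h

lemma pvMem_eraseIdx (l : List Int) (h : l.Nodup) (j : Nat) (hj : j < l.length) (w : Int) :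
    w ∈ l.eraseIdx j ↔ w ∈ l ∧ w ≠ l[j] := by
  rw [List.mem_eraseIdx_iff_getElem]
  constructor
  · rintro ⟨i, hi, hij, rfl⟩
    refine ⟨List.getElem_mem _, fun he => hij ?_⟩
    exact (List.Nodup.getElem_inj_iff h).1 he
  · rintro ⟨hw, hne⟩
    obtain ⟨i, hi, rfl⟩ := List.mem_iff_getElem.1 hw
    exact ⟨i, hi, fun he => hne (by subst he; rfl), rfl⟩

-- ---- main loop: A's fold and Source B's fold keep equal pairs and equal used/taken sets ----

lemma pv_main (b_sorted : List Int) (hbs : b_sorted.Pairwise (· ≤ ·)) :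
    ∀ (as : List Int) (pairs : List (Option Int × Int)) (used : PySem.Set Int) (avail : List Int),
      avail.Pairwise (· < ·) →
      (∀ w, w ∈ avail ↔ w ∈ b_sorted ∧ ¬ w ∈ used) →
      (as.foldl (fun (st : List (Option Int × Int) × PySem.Set Int) a =>
        match pvBestScan a b_sorted st.2 with
        | some (best, _) => (st.1 ++ [((some a : Option Int), best)], PySem.Set.add st.2 best)
        | none => st) (pairs, used)) =
      ((as.foldl (fun st a => pvStepB a st) (avail, used, pairs)).2.2,
       (as.foldl (fun st a => pvStepB a st) (avail, used, pairs)).2.1) := by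
  intro as
  induction as with
  | nil => intro pairs used avail _ _; rfl
  | cons a as ih =>
    intro pairs used avail h1 hInv
    rw [List.foldl_cons, List.foldl_cons]
    have hFmem : ∀ w, w ∈ b_sorted.filter (fun b => !(PySem.Set.contains used b)) ↔ w ∈ avail := by
      intro w
      rw [hInv w, List.mem_filter]
      simp
    by_cases hav : avail = []
    · subst hav
      have hFnil : b_sorted.filter (fun b => !(PySem.Set.contains used b)) = [] := by
        rw [List.eq_nil_iff_forall_not_mem]
        intro w hw
        exact absurd ((hFmem w).1 hw) (List.not_mem_nil)
      have hscan : pvBestScan a b_sorted used = none := by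
        rw [pvBestScan_eq_filter, hFnil]; rfl
      rw [hscan]
      have hstep : pvStepB a ([], used, pairs) = ([], used, pairs) := by
        simp [pvStepB]
      rw [hstep]
      exact ih pairs used [] h1 hInv
    · have hFs : (b_sorted.filter (fun b => !(PySem.Set.contains used b))).Pairwise (· ≤ ·) :=
        hbs.filter _
      have hFne : b_sorted.filter (fun b => !(PySem.Set.contains used b)) ≠ [] := by
        intro hnil
        obtain ⟨x, hx⟩ := List.exists_mem_of_ne_nil avail hav
        exact absurd ((hFmem x).2 hx) (by rw [hnil]; exact List.not_mem_nil)
      obtain ⟨f, F', hFc⟩ := List.exists_cons_of_ne_nil hFne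
      obtain ⟨v, heq, hbest⟩ := pvScan_spec a F' f (by rw [← hFc]; exact hFs)
      have hscan : pvBestScan a b_sorted used = some (v, |a - v|) := by
        rw [pvBestScan_eq_filter, hFc, List.foldl_cons]
        exact heq
      have hbestA : PvIsBest a v avail := pvIsBest_congr hFmem (by rw [hFc]; exact hbest)
      -- B side
      set j : Nat := (if pvBisect avail a 0 avail.length = avail.length then pvBisect avail a 0 avail.length - 1
          else if pvBisect avail a 0 avail.length = 0 then 0
          else if a - PySem.List.pyGetD avail ((pvBisect avail a 0 avail.length : Int) - 1) 0 ≤ PySem.List.pyGetD avail ((pvBisect avail a 0 avail.length : Int)) 0 - a then pvBisect avail a 0 avail.length - 1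
          else pvBisect avail a 0 avail.length) with hjeq
      obtain ⟨hjlt, hbestB⟩ := pvChoose_spec avail a h1 hav j (by rw [hjeq])
      have hveq : avail.getD j 0 = v := pvIsBest_unique hbestB hbestA
      have hgetj : avail[j] = v := by
        rw [← hveq]; rw [List.getD_eq_getElem _ _ hjlt]
      have hstep : pvStepB a (avail, used, pairs) =
          (avail.eraseIdx j, PySem.Set.add used v, pairs ++ [((some a : Option Int), v)]) := by
        unfold pvStepB
        dsimp only
        rw [if_neg (by simp [hav])]
        rw [← hjeq]
        rw [PySem.List.pop?_natCast avail j hjlt, hgetj]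
      rw [hscan, hstep]
      have hnodup : avail.Nodup := h1.imp (fun hlt => ne_of_lt hlt)
      refine ih _ _ _ (List.Pairwise.sublist (List.eraseIdx_sublist avail j) h1) ?_
      intro w
      rw [pvMem_eraseIdx avail hnodup j hjlt w, hInv w, hgetj, PySem.Set.mem_add]
      tauto

-- ===== VERDICT (by name: the statement is the Claim_ definition above) =====
theorem pair_offsets_spec : Claim_equal_pair_offsets := by
  intro a_offsets b_offsets _
  unfold Spec_pair_offsets pair_offsets pair_offsets_alt
  dsimp only
  have hbs : (PySem.List.sorted b_offsets (fun x => x) false).Pairwise (· ≤ ·) :=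
    PySem.List.sorted_pairwise b_offsets (fun x => x)
  have hbuild := pvBuild_go (PySem.List.sorted b_offsets (fun x => x) false) []
    (List.Pairwise.nil) (by intro x hx; exact absurd hx (List.not_mem_nil)) hbs
  rw [← pvBuildAvail] at hbuild
  have hmem0 : ∀ w, w ∈ pvBuildAvail (PySem.List.sorted b_offsets (fun x => x) false) ↔
      w ∈ (PySem.List.sorted b_offsets (fun x => x) false) ∧ ¬ w ∈ (PySem.Set.empty : PySem.Set Int) := by
    intro w
    rw [(hbuild.2 w)]
    simp [PySem.Set.empty]
  have hmain := pv_main (PySem.List.sorted b_offsets (fun x => x) false) hbs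
    (PySem.List.sorted a_offsets (fun x => x) false) [] PySem.Set.empty
    (pvBuildAvail (PySem.List.sorted b_offsets (fun x => x) false)) hbuild.1 hmem0
  rw [Prod.ext_iff] at hmain
  rw [hmain.1, hmain.2]
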